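-- pv_equiv track=rewrite | github.com/calincy/HW | d8.py | calculate_actual_prices
-- ===== SOURCE A (Python) =====
-- def calculate_actual_prices(prices):
--     n = len(prices)
--     result = prices[:]  # 复制一份价格作为初始结果
--     stack = []
--
--     # 遍历价格数组两次以模拟循环效果
--     for i in range(2 * n):
--         current_price = prices[i % n]
--         while stack and prices[stack[-1]] > current_price:   #执行完出栈操作后会继续循环与更前的值比较
--             idx = stack.pop()
--             result[idx] += current_price
--         if i < n:
--             stack.append(i)
--
--     return result
-- ===== SOURCE B (Python) =====
-- def calculate_actual_prices(prices):
--     n = len(prices)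
--     result = []
--     for i, p in enumerate(prices):
--         smaller = next((prices[(i + j) % n] for j in range(1, n)
--                         if prices[(i + j) % n] < p), None)
--         result.append(p if smaller is None else p + smaller)
--     return result
-- ===== Notes on version B (the rewrite author's own statement) =====
-- stated objective: simpler
-- what changed: Replaces the two-pass monotonic stack (with an extra result array mutated out of order) by a direct per-index forward circular scan that finds the first strictly smaller price.
import Mathlib
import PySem

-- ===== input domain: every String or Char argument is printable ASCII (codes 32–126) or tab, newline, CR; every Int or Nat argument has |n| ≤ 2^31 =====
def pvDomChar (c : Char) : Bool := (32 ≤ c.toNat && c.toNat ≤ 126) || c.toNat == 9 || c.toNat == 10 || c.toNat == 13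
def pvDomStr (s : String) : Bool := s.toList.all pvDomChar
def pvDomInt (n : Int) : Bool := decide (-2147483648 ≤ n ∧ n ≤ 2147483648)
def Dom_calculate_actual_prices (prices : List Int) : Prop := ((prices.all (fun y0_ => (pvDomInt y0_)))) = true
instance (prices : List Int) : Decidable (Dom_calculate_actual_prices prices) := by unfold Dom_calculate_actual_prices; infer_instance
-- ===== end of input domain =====

-- B replaces A's two-pass monotonic stack by a per-index forward circular scan
-- for the first strictly smaller price (objective: simpler; not faster).

-- ===== PORT A =====
-- the inner `while stack and prices[stack[-1]] > current_price` loop;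
-- stack is held head-at-top (Python's list end)
def pvPopLoop (P : List Int) (res : List Int) (stack : List Nat) (cur : Int) :
    List Int × List Nat :=
  match stack with
  | [] => (res, [])
  | idx :: rest =>
    if P.getD idx 0 > cur then
      pvPopLoop P (res.set idx (res.getD idx 0 + cur)) rest cur
    else (res, idx :: rest)

-- one iteration of `for i in range(2 * n)`
def pvStepA (P : List Int) (n : Nat) (s : List Int × List Nat) (i : Nat) :
    List Int × List Nat :=
  let cur := P.getD (i % n) 0
  let rs := pvPopLoop P s.1 s.2 cur
  if i < n then (rs.1, i :: rs.2) else rs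

def calculate_actual_prices (prices : List Int) : List Int :=
  let n := prices.length
  ((List.range (2 * n)).foldl (pvStepA prices n) (prices, ([] : List Nat))).1

-- ===== PORT B =====
-- `next((prices[(i+j) % n] for j in range(1, n) if prices[(i+j) % n] < p), None)`
def pvFindSmaller (P : List Int) (n i : Nat) (p : Int) : Option Int :=
  ((List.range' 1 (n - 1)).find? (fun j => decide (P.getD ((i + j) % n) 0 < p))).map
    (fun j => P.getD ((i + j) % n) 0)

def calculate_actual_prices_alt (prices : List Int) : List Int :=
  let n := prices.length
  (List.range n).map (fun i =>
    let p := prices.getD i 0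
    match pvFindSmaller prices n i p with
    | some v => p + v
    | none => p)

-- ===== PRECONDITION & SPEC =====
def Spec_calculate_actual_prices (prices : List Int) (out : List Int) : Prop := out = calculate_actual_prices_alt prices
instance (prices : List Int) (out : List Int) : Decidable (Spec_calculate_actual_prices prices out) := by unfold Spec_calculate_actual_prices; infer_instance

-- ===== CLAIM (what is proved, stated in full; the proofs are below) =====
def Claim_equal_calculate_actual_prices : Prop := ∀ (prices : List Int), Dom_calculate_actual_prices prices → Spec_calculate_actual_prices prices (calculate_actual_prices prices)

-- ===== LEMMAS AND PROOFS =====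

-- price at index k (all indices used are < P.length, so the default is never taken)
def pvG (P : List Int) (k : Nat) : Int := P.getD k 0

-- the comparison A makes at virtual time j against base index k
def pvP (P : List Int) (k j : Nat) : Bool := decide (pvG P (j % P.length) < pvG P k)

-- first virtual time j ∈ (k, m) whose price is strictly below price k
def pvFs (P : List Int) (k m : Nat) : Option Nat :=
  (List.range' (k+1) (m - (k+1))).find? (pvP P k)

-- the value A's result holds at k when the first smaller time is `o`
def pvVal (P : List Int) (k : Nat) (o : Option Nat) : Int :=
  pvG P k + (match o with | some j => pvG P (j % P.length) | none => 0)

-- loop invariant of A's main loop after m iterations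
def pvInv (P : List Int) (m : Nat) (s : List Int × List Nat) : Prop :=
  s.1.length = P.length ∧
  (∀ k, k < P.length → s.1.getD k 0 = pvVal P k (pvFs P k m)) ∧
  List.Pairwise (· > ·) s.2 ∧
  (∀ k, k ∈ s.2 ↔ k < min m P.length ∧ pvFs P k m = none)

lemma pv_mem_range' (a s n : Nat) : a ∈ List.range' s n ↔ s ≤ a ∧ a < s + n := by
  rw [List.mem_range']
  constructor
  · rintro ⟨i, hi, rfl⟩; omega
  · rintro ⟨h1, h2⟩; exact ⟨a - s, by omega, by omega⟩

lemma pvFs_none_iff (P : List Int) (k m : Nat) :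
    pvFs P k m = none ↔ ∀ j, k < j → j < m → pvP P k j = false := by
  rw [pvFs, List.find?_eq_none]
  constructor
  · intro h j h1 h2
    have := h j ((pv_mem_range' _ _ _).2 ⟨by omega, by omega⟩)
    simpa using this
  · intro h j hj
    have := (pv_mem_range' _ _ _).1 hj
    simp [h j (by omega) (by omega)]

lemma pvFs_succ (P : List Int) (k m : Nat) (h : k < m) :
    pvFs P k (m+1) = (pvFs P k m).or (if pvP P k m then some m else none) := by
  have hr : List.range' (k+1) (m+1 - (k+1)) = List.range' (k+1) (m - (k+1)) ++ [m] := by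
    have h2 : List.range' (k+1) (m - (k+1)) ++ List.range' (k+1+(m-(k+1))) 1
        = List.range' (k+1) (m - (k+1) + 1) := by
      have := List.range'_append (s := k+1) (m := m - (k+1)) (n := 1) (step := 1)
      simpa using this
    have h3 : k+1+(m-(k+1)) = m := by omega
    have h4 : m + 1 - (k+1) = m - (k+1) + 1 := by omega
    rw [h4, ← h2, h3]; rfl
  rw [pvFs, hr, List.find?_append, pvFs]
  congr 1
  simp [List.find?]
  cases hp : pvP P k m <;> simp [hp]

lemma pvFs_none_of_ge (P : List Int) (k m : Nat) (h : m ≤ k + 1) : pvFs P k m = none := by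
  rw [pvFs]
  have : m - (k+1) = 0 := by omega
  rw [this]; rfl

lemma pv_getD_set (l : List Int) (i j : Nat) (a d : Int) :
    (l.set i a).getD j d = if i = j ∧ i < l.length then a else l.getD j d := by
  simp [List.getD_eq_getElem?_getD, List.getElem?_set]
  split_ifs with h1 h2 <;> simp_all <;> omega

-- pop-loop characterization: pops exactly the takeWhile prefix, adding cur at each
lemma pvPop_spec (P : List Int) (cur : Int) :
    ∀ (stack : List Nat) (res : List Int), List.Pairwise (· > ·) stack →
    (∀ k ∈ stack, k < res.length) →
    (pvPopLoop P res stack cur).2 = stack.dropWhile (fun k => decide (P.getD k 0 > cur)) ∧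
    (pvPopLoop P res stack cur).1.length = res.length ∧
    ∀ k : Nat, (pvPopLoop P res stack cur).1.getD k 0 =
      if k ∈ stack.takeWhile (fun k => decide (P.getD k 0 > cur)) then res.getD k 0 + cur
      else res.getD k 0 := by
  intro stack
  induction stack with
  | nil => intro res _ _; simp [pvPopLoop]
  | cons idx rest ih =>
    intro res hpw hlen
    rcases List.pairwise_cons.1 hpw with ⟨hgt, hpw'⟩
    by_cases hp : P.getD idx 0 > cur
    · have hpd : cur < P[idx]?.getD 0 := by simpa [List.getD_eq_getElem?_getD] using hp
      have hrec := ih (res.set idx (res.getD idx 0 + cur)) hpw'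
        (by intro k hk; rw [List.length_set]; exact hlen k (List.mem_cons_of_mem _ hk))
      simp only [pvPopLoop, if_pos hp]
      rcases hrec with ⟨h1, h2, h3⟩
      refine ⟨by rw [h1]; simp [hpd], by rw [h2, List.length_set], ?_⟩
      intro k
      rw [h3 k]
      have hset := pv_getD_set res idx k (res.getD idx 0 + cur) 0
      have htw : (idx :: rest).takeWhile (fun k => decide (P.getD k 0 > cur))
          = idx :: rest.takeWhile (fun k => decide (P.getD k 0 > cur)) := by
        simp [List.takeWhile_cons, hpd]
      rw [htw]
      have hidxlen : idx < res.length := hlen idx (List.mem_cons_self ..)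
      by_cases hk : k ∈ rest.takeWhile (fun k => decide (P.getD k 0 > cur))
      · have hkr : k ∈ rest := (List.takeWhile_sublist _).subset hk
        have hne : idx ≠ k := by have := hgt k hkr; omega
        simp only [List.getD_eq_getElem?_getD, gt_iff_lt] at hk
        rw [hset]
        simp [hk, hne]
      · simp only [List.getD_eq_getElem?_getD, gt_iff_lt] at hk
        by_cases hik : k = idx
        · subst hik
          rw [hset]
          simp [hk, hidxlen]
        · have hne2 : idx ≠ k := fun h => hik h.symm
          rw [hset]
          simp [hk, hik, hne2]
    · have hpd : ¬ (cur < P[idx]?.getD 0) := by simpa [List.getD_eq_getElem?_getD] using hp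
      simp only [pvPopLoop, if_neg hp]
      refine ⟨by simp [hpd], by simp, ?_⟩
      intro k
      simp [hpd]


-- elements surviving the pop all fail the comparison (prices grow toward the stack top)
lemma pvDrop_not (P : List Int) (m : Nat) :
    ∀ (stack : List Nat), List.Pairwise (· > ·) stack →
    (∀ k ∈ stack, k < min m P.length ∧ pvFs P k m = none) →
    ∀ k ∈ stack.dropWhile (fun k => decide (P.getD k 0 > P.getD (m % P.length) 0)),
      pvP P k m = false := by
  intro stack
  induction stack with
  | nil => simp
  | cons a l ih =>
    intro hpw hh k hk
    rcases List.pairwise_cons.1 hpw with ⟨hgt, hpw'⟩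
    by_cases hp : P.getD a 0 > P.getD (m % P.length) 0
    · have hpd : (decide (P.getD a 0 > P.getD (m % P.length) 0)) = true := decide_eq_true hp
      simp only [List.dropWhile_cons, hpd] at hk
      exact ih hpw' (fun k hk => hh k (List.mem_cons_of_mem _ hk)) k hk
    · have hpd : (decide (P.getD a 0 > P.getD (m % P.length) 0)) = false := decide_eq_false hp
      simp only [List.dropWhile_cons, hpd, Bool.false_eq_true, if_false] at hk
      rcases List.mem_cons.1 hk with rfl | hkl
      · simp only [pvP, pvG, decide_eq_false_iff_not]
        simpa using hp
      · have h1 := hh a (by simp)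
        have h2 := hh k (List.mem_cons_of_mem _ hkl)
        have hak : a > k := hgt k hkl
        have hga : pvP P k a = false :=
          (pvFs_none_iff P k m).1 h2.2 a hak (lt_of_lt_of_le h1.1 (min_le_left _ _))
        have ha : a % P.length = a := Nat.mod_eq_of_lt (lt_of_lt_of_le h1.1 (min_le_right _ _))
        simp only [pvP, pvG, decide_eq_false_iff_not] at hga hp ⊢
        rw [ha] at hga
        omega

-- one iteration of A's main loop preserves the invariant
lemma pvInv_step (P : List Int) (m : Nat) (s : List Int × List Nat)
    (h : pvInv P m s) (hm : m < 2 * P.length) :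
    pvInv P (m+1) (pvStepA P P.length s m) := by
  obtain ⟨hL, hres, hpw, hmem⟩ := h
  have hlen' : ∀ k ∈ s.2, k < s.1.length := by
    intro k hk; rw [hL]; exact lt_of_lt_of_le ((hmem k).1 hk).1 (min_le_right _ _)
  obtain ⟨hdrop, hlen2, hgetD⟩ := pvPop_spec P (P.getD (m % P.length) 0) s.2 s.1 hpw hlen'
  have hdropF : ∀ k ∈ s.2.dropWhile
      (fun k => decide (P.getD k 0 > P.getD (m % P.length) 0)), pvP P k m = false :=
    pvDrop_not P m s.2 hpw (fun k hk => (hmem k).1 hk)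
  have htakeF : ∀ k ∈ s.2.takeWhile
      (fun k => decide (P.getD k 0 > P.getD (m % P.length) 0)),
      k ∈ s.2 ∧ pvP P k m = true := by
    intro k hk
    refine ⟨(List.takeWhile_sublist _).subset hk, ?_⟩
    have := List.mem_takeWhile_imp hk
    simp only [decide_eq_true_eq] at this
    simp only [pvP, pvG, decide_eq_true_eq]
    exact this
  -- the new result component
  have hres' : ∀ k, k < P.length →
      (pvPopLoop P s.1 s.2 (P.getD (m % P.length) 0)).1.getD k 0 = pvVal P k (pvFs P k (m+1)) := by
    intro k hk
    rw [hgetD k]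
    by_cases htk : k ∈ s.2.takeWhile (fun k => decide (P.getD k 0 > P.getD (m % P.length) 0))
    · obtain ⟨hks, hpk⟩ := htakeF k htk
      have hkm : k < m := lt_of_lt_of_le ((hmem k).1 hks).1 (min_le_left _ _)
      have hfsm : pvFs P k m = none := ((hmem k).1 hks).2
      have : pvFs P k (m+1) = some m := by
        rw [pvFs_succ P k m hkm, hfsm, hpk]; rfl
      rw [if_pos htk, this, hres k hk, hfsm]
      simp [pvVal, pvG]
    · rw [if_neg htk, hres k hk]
      congr 1
      by_cases hks : k ∈ s.2
      · have hkd : k ∈ s.2.dropWhile (fun k => decide (P.getD k 0 > P.getD (m % P.length) 0)) := by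
          have hsplit := List.takeWhile_append_dropWhile
            (p := fun k => decide (P.getD k 0 > P.getD (m % P.length) 0)) (l := s.2)
          rw [← hsplit] at hks
          rcases List.mem_append.1 hks with h' | h'
          · exact absurd h' htk
          · exact h'
        have hkm : k < m := lt_of_lt_of_le ((hmem k).1 hks).1 (min_le_left _ _)
        rw [pvFs_succ P k m hkm, ((hmem k).1 hks).2, hdropF k hkd]
        rfl
      · by_cases hkm : k < m
        · have hne : pvFs P k m ≠ none := by
            intro hcon
            exact hks ((hmem k).2 ⟨lt_min hkm hk, hcon⟩)
          rcases Option.ne_none_iff_exists'.1 hne with ⟨j, hj⟩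
          rw [pvFs_succ P k m hkm, hj]
          rfl
        · rw [pvFs_none_of_ge P k m (by omega), pvFs_none_of_ge P k (m+1) (by omega)]
  constructor
  · -- length
    simp only [pvStepA]
    split <;> exact hlen2.trans hL
  constructor
  · -- result values
    intro k hk
    simp only [pvStepA]
    split <;> exact hres' k hk
  -- stack part
  have hdw_pw : List.Pairwise (· > ·)
      (s.2.dropWhile (fun k => decide (P.getD k 0 > P.getD (m % P.length) 0))) :=
    hpw.sublist (List.dropWhile_sublist _)
  have hdw_mem : ∀ k, k ∈ s.2.dropWhile (fun k => decide (P.getD k 0 > P.getD (m % P.length) 0)) ↔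
      (k < min m P.length ∧ pvFs P k (m+1) = none) := by
    intro k
    constructor
    · intro hk
      have hks : k ∈ s.2 := (List.dropWhile_sublist _).subset hk
      have h1 := (hmem k).1 hks
      have hkm : k < m := lt_of_lt_of_le h1.1 (min_le_left _ _)
      refine ⟨h1.1, ?_⟩
      rw [pvFs_succ P k m hkm, h1.2, hdropF k hk]
      rfl
    · rintro ⟨h1, h2⟩
      have hkm : k < m := lt_of_lt_of_le h1 (min_le_left _ _)
      rw [pvFs_succ P k m hkm] at h2
      have hor := Option.or_eq_none_iff.1 h2
      have hks : k ∈ s.2 := (hmem k).2 ⟨h1, hor.1⟩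
      have hpf : pvP P k m = false := by
        rcases hor with ⟨-, h3⟩
        by_cases hb : pvP P k m
        · rw [if_pos hb] at h3; cases h3
        · simpa using hb
      have hsplit := List.takeWhile_append_dropWhile
        (p := fun k => decide (P.getD k 0 > P.getD (m % P.length) 0)) (l := s.2)
      rw [← hsplit] at hks
      rcases List.mem_append.1 hks with h' | h'
      · exact absurd (htakeF k h').2 (by simp [hpf])
      · exact h'
  constructor
  · -- pairwise
    simp only [pvStepA]
    split
    · rw [hdrop]
      refine List.pairwise_cons.2 ⟨?_, hdw_pw⟩
      intro k hk
      have := ((hmem k).1 ((List.dropWhile_sublist _).subset hk)).1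
      omega
    · rw [hdrop]; exact hdw_pw
  · -- membership
    intro k
    simp only [pvStepA]
    split
    · next hmn =>
      rw [hdrop]
      rw [List.mem_cons]
      constructor
      · rintro (rfl | hk)
        · exact ⟨by omega, pvFs_none_of_ge P k (k+1) (le_refl _)⟩
        · have := (hdw_mem k).1 hk
          exact ⟨by omega, this.2⟩
      · rintro ⟨h1, h2⟩
        by_cases hkm : k = m
        · exact Or.inl hkm
        · refine Or.inr ((hdw_mem k).2 ⟨?_, h2⟩)
          omega
    · next hmn =>
      rw [hdrop, hdw_mem k]
      constructor
      · rintro ⟨h1, h2⟩; exact ⟨by omega, h2⟩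
      · rintro ⟨h1, h2⟩; exact ⟨by omega, h2⟩

-- the invariant holds after the whole loop
lemma pvInv_foldl (P : List Int) :
    ∀ m, m ≤ 2 * P.length →
      pvInv P m ((List.range m).foldl (pvStepA P P.length) (P, ([] : List Nat))) := by
  intro m
  induction m with
  | zero =>
    intro _
    refine ⟨rfl, ?_, List.Pairwise.nil, ?_⟩
    · intro k hk
      rw [pvFs_none_of_ge P k 0 (by omega)]
      simp [pvVal, pvG]
    · intro k; simp
  | succ m ih =>
    intro hm
    rw [List.range_succ, List.foldl_append]
    exact pvInv_step P m _ (ih (by omega)) (by omega)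

-- bridge: A's "first smaller virtual time in (k, 2n)" is B's circular scan
lemma pv_bridge (P : List Int) (k : Nat) (hk : k < P.length) :
    pvVal P k (pvFs P k (2 * P.length)) =
      (match pvFindSmaller P P.length k (P.getD k 0) with
       | some v => P.getD k 0 + v
       | none => P.getD k 0) := by
  have hsplit : List.range' (k+1) (2 * P.length - (k+1))
      = List.range' (k+1) (P.length - 1) ++ List.range' (k + P.length) (P.length - k) := by
    have h2 : List.range' (k+1) (P.length - 1) ++ List.range' (k+1+(P.length-1)) (P.length - k)
        = List.range' (k+1) (P.length - 1 + (P.length - k)) := by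
      have := List.range'_append (s := k+1) (m := P.length - 1) (n := P.length - k) (step := 1)
      simpa using this
    have h3 : k+1+(P.length-1) = k + P.length := by omega
    have h4 : 2 * P.length - (k+1) = P.length - 1 + (P.length - k) := by omega
    rw [h4, ← h2, h3]
  have hQ : ∀ t, pvP P k ((k+1) + t) = decide (P.getD ((k + (1+t)) % P.length) 0 < P.getD k 0) := by
    intro t
    have ht : k + 1 + t = k + (1 + t) := by omega
    simp only [pvP, pvG, ht]
  have hmap1 : List.range' (k+1) (P.length - 1) = (List.range (P.length - 1)).map ((k+1) + ·) :=
    List.range'_eq_map_range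
  have hmap2 : List.range' 1 (P.length - 1) = (List.range (P.length - 1)).map (1 + ·) :=
    List.range'_eq_map_range
  have hfirst : (List.range' (k+1) (P.length - 1)).find? (pvP P k)
      = ((List.range (P.length - 1)).find?
          (fun t => decide (P.getD ((k + (1+t)) % P.length) 0 < P.getD k 0))).map ((k+1) + ·) := by
    have hfun : (pvP P k ∘ fun x => k + 1 + x)
        = (fun t => decide (P.getD ((k + (1+t)) % P.length) 0 < P.getD k 0)) :=
      funext (fun t => hQ t)
    rw [hmap1, List.find?_map, hfun]
  have hBfind : pvFindSmaller P P.length k (P.getD k 0)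
      = (((List.range (P.length - 1)).find?
          (fun t => decide (P.getD ((k + (1+t)) % P.length) 0 < P.getD k 0))).map (1 + ·)).map
          (fun j => P.getD ((k + j) % P.length) 0) := by
    rw [pvFindSmaller, hmap2, List.find?_map]
    rfl
  rw [pvVal.eq_def, pvFs, hsplit, List.find?_append, hfirst, hBfind]
  cases hfd : (List.range (P.length - 1)).find?
      (fun t => decide (P.getD ((k + (1+t)) % P.length) 0 < P.getD k 0)) with
  | some t =>
    simp only [Option.map_some, Option.some_or]
    have ht : k + 1 + t = k + (1 + t) := by omega
    simp [pvG, ht]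
  | none =>
    have hsecond : (List.range' (k + P.length) (P.length - k)).find? (pvP P k) = none := by
      rw [List.find?_eq_none]
      intro j hj
      obtain ⟨hj1, hj2⟩ := (pv_mem_range' j (k + P.length) (P.length - k)).1 hj
      have hjmod : j % P.length = j - P.length := by
        rw [Nat.mod_eq_sub_mod (by omega)]
        exact Nat.mod_eq_of_lt (by omega)
      by_cases hjk : j - P.length = k
      · simp [pvP, pvG, hjmod, hjk]
      · have hmem1 : j - P.length ∈ List.range' (k+1) (P.length - 1) := by
          rw [pv_mem_range']
          omega
        have hnone1 : (List.range' (k+1) (P.length - 1)).find? (pvP P k) = none := by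
          rw [hfirst, hfd]; rfl
        have := List.find?_eq_none.1 hnone1 (j - P.length) hmem1
        have hjmod2 : (j - P.length) % P.length = j - P.length := Nat.mod_eq_of_lt (by omega)
        simp only [pvP, pvG] at this ⊢
        rw [hjmod]
        rw [hjmod2] at this
        exact this
    simp [hsecond, pvG]

-- ===== VERDICT (by name: the statement is the Claim_ definition above) =====
theorem calculate_actual_prices_spec : Claim_equal_calculate_actual_prices := by
  intro P _
  unfold Spec_calculate_actual_prices
  have hinv := pvInv_foldl P (2 * P.length) (le_refl _)
  obtain ⟨hL, hres, -, -⟩ := hinv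
  unfold calculate_actual_prices calculate_actual_prices_alt
  apply List.ext_getElem
  · simp [hL]
  · intro i h1 h2
    have hi : i < P.length := by simpa [hL] using h1
    have hgd := hres i hi
    rw [List.getD_eq_getElem?_getD, List.getElem?_eq_getElem h1] at hgd
    simp only [Option.getD_some] at hgd
    rw [hgd]
    rw [List.getElem_map, List.getElem_range]
    simpa using pv_bridge P i hi
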